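-- pv_equiv track=rewrite | github.com/jang-namu/py-algorithm | solved/programmers-Lv3/주사위 고르기.py | sum_statistics
-- ===== SOURCE A (Python) =====
-- def sum_statistics(dice, combination):
--     result = dict()
--     for num in dice[combination[0]]:
--         result[num] = result.get(num, 0) + 1
--
--
--     for i in combination[1:]:
--         next = dict()
--         for num in dice[i]:
--             for k, v in result.items():
--                 next[k + num] = next.get(k+num, 0) + v
--         result = next
--     return result
-- ===== SOURCE B (Python) =====
-- def sum_statistics(dice, combination):
--     selected = [dice[i] for i in combination]
--     counts = {}
--
--     def go(j, acc):
--         if j < 0: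
--             counts[acc] = counts.get(acc, 0) + 1
--         else:
--             for face in selected[j]:
--                 go(j - 1, acc + face)
--
--     go(len(selected) - 1, 0)
--     return counts
-- ===== Notes on version B (the rewrite author's own statement) =====
-- stated objective: alternative
-- what changed: B replaces A's iterative dict-convolution (building a sum-distribution dict and convolving it with each further die) by a direct recursive enumeration of the Cartesian product of the selected dice's faces, tallying each total in one counter dict.
-- crash fix: On an empty combination A raises IndexError at dice[combination[0]] while B returns {0: 1} (one empty face-tuple with sum 0), the natural value of an empty product. — e.g. on sum_statistics([[1]], []): A raises IndexError, B returns [(0, 1)]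
import Mathlib
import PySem

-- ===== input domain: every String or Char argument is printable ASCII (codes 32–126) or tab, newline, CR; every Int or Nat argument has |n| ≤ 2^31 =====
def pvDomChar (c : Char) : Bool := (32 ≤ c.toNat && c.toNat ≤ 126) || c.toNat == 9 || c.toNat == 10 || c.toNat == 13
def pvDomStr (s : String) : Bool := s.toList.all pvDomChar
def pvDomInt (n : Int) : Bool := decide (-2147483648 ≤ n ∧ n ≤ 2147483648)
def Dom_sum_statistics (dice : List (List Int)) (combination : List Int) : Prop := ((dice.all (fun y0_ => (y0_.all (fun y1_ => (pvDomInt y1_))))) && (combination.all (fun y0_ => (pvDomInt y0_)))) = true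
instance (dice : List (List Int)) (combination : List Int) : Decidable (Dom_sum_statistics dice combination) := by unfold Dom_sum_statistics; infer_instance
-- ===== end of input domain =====

-- B enumerates the Cartesian product of the selected dice's faces recursively and tallies each
-- total in one counter dict, instead of A's iterative dict-convolution die by die (alternative
-- decomposition; not claimed faster). Return values agree (same dict, same insertion order).

-- ===== PORT A =====
def sum_statistics (dice : List (List Int)) (combination : List Int) : List (Int × Int) :=
  match PySem.List.pyGet? combination 0 with
  | none => []        -- combination[0] raises IndexError: excluded by Pre_
  | some c0 =>
    match PySem.List.pyGet? dice c0 with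
    | none => []      -- dice[combination[0]] raises IndexError: excluded by Pre_
    | some die0 =>
      let result : PySem.Dict Int Int :=
        die0.foldl (fun r num => r.insert num (r.getD num 0 + 1)) PySem.Dict.empty
      let result : PySem.Dict Int Int :=
        (PySem.List.slice combination (some 1) none).foldl
          (fun r i =>
            -- dice[i]: pyGetD is exact under Pre_ (Raise.InRange dice.length i)
            (PySem.List.pyGetD dice i []).foldl
              (fun nx num =>
                r.items.foldl
                  (fun nx kv => nx.insert (kv.1 + num) (nx.getD (kv.1 + num) 0 + kv.2)) nx)
              PySem.Dict.empty)
          result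
      result.items

-- ===== PORT B =====
-- go(j, acc): recursion over the selected dice, j counting down (fuel j+1; fuel 0 = Python's j < 0)
def pvGoB (selected : List (List Int)) : Nat → Int → PySem.Dict Int Int → PySem.Dict Int Int
  | 0, acc, counts => counts.insert acc (counts.getD acc 0 + 1)
  | j+1, acc, counts =>
      (selected.getD j []).foldl (fun c face => pvGoB selected j (acc + face) c) counts

def sum_statistics_alt (dice : List (List Int)) (combination : List Int) : List (Int × Int) :=
  -- dice[i]: pyGetD is exact under Pre_ (Raise.InRange dice.length i)
  let selected := combination.map (fun i => PySem.List.pyGetD dice i [])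
  (pvGoB selected selected.length 0 PySem.Dict.empty).items

-- ===== PRECONDITION & SPEC =====
-- Pre_ excludes exactly the inputs on which the Python A raises IndexError:
-- an empty combination (combination[0]) and any selected index outside dice's range (dice[i]).
def Pre_sum_statistics (dice : List (List Int)) (combination : List Int) : Prop :=
  combination ≠ [] ∧ ∀ i ∈ combination, PySem.Raise.InRange dice.length i
instance (dice : List (List Int)) (combination : List Int) : Decidable (Pre_sum_statistics dice combination) := by unfold Pre_sum_statistics; infer_instance

def pvWitness_sum_statistics : List (List Int) × List Int := ([[1, 2], [3]], [0, 1])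

-- On an empty combination A raises IndexError at dice[combination[0]] while B returns {0: 1}
-- (one empty face-tuple with sum 0), the natural value of an empty product.
def Raises_sum_statistics (dice : List (List Int)) (combination : List Int) : Prop :=
  combination = []
instance (dice : List (List Int)) (combination : List Int) : Decidable (Raises_sum_statistics dice combination) := by unfold Raises_sum_statistics; infer_instance
def pvRaiseWitness_sum_statistics : List (List Int) × List Int := ([[1]], [])
def pvRaiseWitnessOut_sum_statistics : List (Int × Int) := [(0, 1)]

def Spec_sum_statistics (dice : List (List Int)) (combination : List Int) (out : List (Int × Int)) : Prop := out = sum_statistics_alt dice combination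
instance (dice : List (List Int)) (combination : List Int) (out : List (Int × Int)) : Decidable (Spec_sum_statistics dice combination out) := by unfold Spec_sum_statistics; infer_instance

-- ===== CLAIM (what is proved, stated in full; the proofs are below) =====
def Claim_equal_sum_statistics : Prop := ∀ (dice : List (List Int)) (combination : List Int), Dom_sum_statistics dice combination → Pre_sum_statistics dice combination → Spec_sum_statistics dice combination (sum_statistics dice combination)

def Claim_raises_sum_statistics : Prop := (∀ (dice : List (List Int)) (combination : List Int), Dom_sum_statistics dice combination → Raises_sum_statistics dice combination → ¬ Pre_sum_statistics dice combination) ∧ (Dom_sum_statistics (pvRaiseWitness_sum_statistics.1) (pvRaiseWitness_sum_statistics.2) ∧ Raises_sum_statistics (pvRaiseWitness_sum_statistics.1) (pvRaiseWitness_sum_statistics.2) ∧ sum_statistics_alt (pvRaiseWitness_sum_statistics.1) (pvRaiseWitness_sum_statistics.2) = pvRaiseWitnessOut_sum_statistics)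

-- ===== LEMMAS AND PROOFS =====

-- "bump": fold a stream of (key, amount) pairs into a dict, adding each amount at its key.
def pvBump (c : PySem.Dict Int Int) (s : List (Int × Int)) : PySem.Dict Int Int :=
  s.foldl (fun c kv => c.insert kv.1 (c.getD kv.1 0 + kv.2)) c

def pvShift (acc : Int) (s : List (Int × Int)) : List (Int × Int) :=
  s.map (fun kv => (kv.1 + acc, kv.2))

-- A's convolution step and full convolution, phrased with pvBump/pvShift.
def pvStep (r : PySem.Dict Int Int) (di : List Int) : PySem.Dict Int Int :=
  di.foldl (fun nx num => pvBump nx (pvShift num r.items)) PySem.Dict.empty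

def pvConv (d0 : List Int) (rest : List (List Int)) : PySem.Dict Int Int :=
  rest.foldl pvStep (d0.foldl (fun r num => r.insert num (r.getD num 0 + 1)) PySem.Dict.empty)

theorem pvBump_nil (c : PySem.Dict Int Int) : pvBump c [] = c := rfl

theorem pvBump_cons (c : PySem.Dict Int Int) (k v : Int) (t : List (Int × Int)) :
    pvBump c ((k, v) :: t) = pvBump (c.insert k (c.getD k 0 + v)) t := rfl

theorem pvBump_append (c : PySem.Dict Int Int) (s t : List (Int × Int)) :
    pvBump c (s ++ t) = pvBump (pvBump c s) t := by
  simp [pvBump, List.foldl_append]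

theorem get?_pvBump_of_not_mem (s : List (Int × Int)) (c : PySem.Dict Int Int) (k : Int)
    (h : k ∉ s.map Prod.fst) : (pvBump c s).get? k = c.get? k := by
  induction s generalizing c with
  | nil => rfl
  | cons kv t ih =>
      simp only [List.map_cons, List.mem_cons, not_or] at h
      rw [show (kv :: t : List (Int × Int)) = (kv.1, kv.2) :: t from rfl, pvBump_cons,
        ih _ h.2, PySem.Dict.get?_insert_of_ne _ _ h.1]

theorem insert_insert_comm_of_contains (c : PySem.Dict Int Int) (k k' a w : Int)
    (hc : c.contains k = true) (hne : k' ≠ k) :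
    (c.insert k a).insert k' w = (c.insert k' w).insert k a := by
  by_cases hc' : c.contains k' = true
  · apply PySem.Dict.ext
    rw [PySem.Dict.items_insert_of_contains _ _ (by rw [PySem.Dict.contains_insert]; simp [hc']),
        PySem.Dict.items_insert_of_contains _ _ hc,
        PySem.Dict.items_insert_of_contains _ _ (by rw [PySem.Dict.contains_insert]; simp [hc]),
        PySem.Dict.items_insert_of_contains _ _ hc']
    simp only [List.map_map]
    apply List.map_congr_left
    intro p _
    by_cases h1 : p.1 = k <;> by_cases h2 : p.1 = k' <;>
      simp_all [Function.comp, Ne.symm hne]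
  · have hc'' : c.contains k' = false := by simpa using hc'
    apply PySem.Dict.ext
    rw [PySem.Dict.items_insert_of_not_contains _ _
          (by rw [PySem.Dict.contains_insert]; simp [hc'', hne]),
        PySem.Dict.items_insert_of_contains _ _ hc,
        PySem.Dict.items_insert_of_contains _ _ (by rw [PySem.Dict.contains_insert]; simp [hc]),
        PySem.Dict.items_insert_of_not_contains _ _ hc'']
    rw [List.map_append]
    simp [hne]

theorem pvBump_insert_comm (s : List (Int × Int)) (c : PySem.Dict Int Int) (k a : Int)
    (hm : k ∉ s.map Prod.fst) (hc : c.contains k = true) :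
    pvBump (c.insert k a) s = (pvBump c s).insert k a := by
  induction s generalizing c with
  | nil => rfl
  | cons kv t ih =>
      simp only [List.map_cons, List.mem_cons, not_or] at hm
      rw [show (kv :: t : List (Int × Int)) = (kv.1, kv.2) :: t from rfl, pvBump_cons, pvBump_cons,
        PySem.Dict.getD_insert_of_ne _ _ _ (Ne.symm hm.1),
        insert_insert_comm_of_contains c k kv.1 a _ hc (Ne.symm hm.1),
        ih _ hm.2 (by rw [PySem.Dict.contains_insert]; simp [hc])]

theorem pvBump_map_replace (l : List (Int × Int)) (c : PySem.Dict Int Int) (k v : Int)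
    (hnd : (l.map Prod.fst).Nodup) (hk : k ∈ l.map Prod.fst) :
    pvBump c (l.map (fun p => if p.1 == k then (k, (PySem.Dict.mk l).getD k 0 + v) else p)) =
      (pvBump c l).insert k ((pvBump c l).getD k 0 + v) := by
  induction l generalizing c with
  | nil => simp at hk
  | cons hd t ih =>
      obtain ⟨k1, w⟩ := hd
      simp only [List.map_cons, List.nodup_cons] at hnd
      by_cases hk1 : k1 = k
      · subst hk1
        have hgd : (PySem.Dict.mk ((k1, w) :: t)).getD k1 0 = w := by
          rw [PySem.Dict.getD_eq_get?_getD, PySem.Dict.get?_mk_cons]; simp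
        have htmap : ∀ f : Int × Int → Int × Int,
            (∀ p ∈ t, f p = p) → t.map f = t := by
          intro f hf; rw [List.map_congr_left hf]; exact List.map_id' t
        rw [List.map_cons, hgd]
        have hhead : (if (((k1, w).1 == k1) = true) then (k1, w + v) else (k1, w)) = (k1, w + v) := by
          simp
        rw [hhead]
        rw [htmap _ (by
          intro p hp
          have : p.1 ≠ k1 := fun h => hnd.1 (h ▸ List.mem_map_of_mem hp)
          simp [this])]
        rw [pvBump_cons, pvBump_cons]
        have hnm : k1 ∉ t.map Prod.fst := hnd.1
        have hgd2 : (pvBump (c.insert k1 (c.getD k1 0 + w)) t).getD k1 0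
            = c.getD k1 0 + w := by
          rw [PySem.Dict.getD_eq_get?_getD, get?_pvBump_of_not_mem t _ _ hnm,
            ← PySem.Dict.getD_eq_get?_getD, PySem.Dict.getD_insert_self]
        rw [hgd2, ← pvBump_insert_comm t _ _ _ hnm (PySem.Dict.contains_insert_self _ _ _),
          PySem.Dict.insert_insert_self, add_assoc]
      · have hk' : k ∈ t.map Prod.fst := by
          rcases List.mem_cons.mp hk with h | h
          · exact absurd h.symm hk1
          · exact h
        have hgd : (PySem.Dict.mk ((k1, w) :: t)).getD k 0 = (PySem.Dict.mk t).getD k 0 := by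
          rw [PySem.Dict.getD_eq_get?_getD, PySem.Dict.get?_mk_cons,
            if_neg (by simp [hk1]), ← PySem.Dict.getD_eq_get?_getD]
        rw [List.map_cons, hgd]
        have hhead : (if (((k1, w).1 == k) = true) then (k, (PySem.Dict.mk t).getD k 0 + v) else (k1, w)) = (k1, w) := by
          simp [hk1]
        rw [hhead, pvBump_cons, pvBump_cons]
        exact ih _ hnd.2 hk'

theorem pvBump_insert_step (d : PySem.Dict Int Int) (c : PySem.Dict Int Int) (k v : Int)
    (hnd : d.keys.Nodup) :
    pvBump c (d.insert k (d.getD k 0 + v)).items =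
      (pvBump c d.items).insert k ((pvBump c d.items).getD k 0 + v) := by
  by_cases hc : d.contains k = true
  · have hk : k ∈ d.items.map Prod.fst := by
      have := PySem.Dict.contains_eq_decide_mem_keys d k
      rw [hc] at this
      have hkm : k ∈ d.keys := by simpa using this.symm
      simpa [PySem.Dict.keys] using hkm
    have hnd' : (d.items.map Prod.fst).Nodup := by simpa [PySem.Dict.keys] using hnd
    rw [PySem.Dict.items_insert_of_contains _ _ hc]
    have := pvBump_map_replace d.items c k v hnd' hk
    simpa using this
  · have hc' : d.contains k = false := by simpa using hc
    rw [PySem.Dict.items_insert_of_not_contains _ _ hc', PySem.Dict.getD_of_not_contains _ _ hc',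
      pvBump_append, zero_add]
    rfl

theorem pvBump_pvBump_items (s : List (Int × Int)) (c d : PySem.Dict Int Int)
    (hnd : d.keys.Nodup) :
    pvBump c (pvBump d s).items = pvBump (pvBump c d.items) s := by
  induction s generalizing c d with
  | nil => rfl
  | cons kv t ih =>
      rw [show (kv :: t : List (Int × Int)) = (kv.1, kv.2) :: t from rfl, pvBump_cons, pvBump_cons,
        ih _ _ (PySem.Dict.nodup_keys_insert _ _ _ hnd), pvBump_insert_step _ _ _ _ hnd]

theorem pvBump_norm (s : List (Int × Int)) (c : PySem.Dict Int Int) :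
    pvBump c (pvBump PySem.Dict.empty s).items = pvBump c s := by
  rw [pvBump_pvBump_items s c PySem.Dict.empty PySem.Dict.nodup_keys_empty]
  rfl

-- shift lemmas: adding a constant to every key commutes with building the dict
theorem get?_mk_pvShift (l : List (Int × Int)) (acc k : Int) :
    (PySem.Dict.mk (pvShift acc l)).get? (k + acc) = (PySem.Dict.mk l).get? k := by
  induction l with
  | nil => rfl
  | cons hd t ih =>
      obtain ⟨k1, w⟩ := hd
      rw [show pvShift acc ((k1, w) :: t) = (k1 + acc, w) :: pvShift acc t from rfl,
        PySem.Dict.get?_mk_cons, PySem.Dict.get?_mk_cons]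
      by_cases h : k1 = k
      · simp [h]
      · rw [if_neg (by simpa using fun hh => h (by omega)), if_neg (by simpa using h), ih]

theorem contains_mk_pvShift (l : List (Int × Int)) (acc k : Int) :
    (PySem.Dict.mk (pvShift acc l)).contains (k + acc) = (PySem.Dict.mk l).contains k := by
  rw [PySem.Dict.contains_eq_isSome_get?, PySem.Dict.contains_eq_isSome_get?, get?_mk_pvShift]

theorem insert_mk_pvShift (l : List (Int × Int)) (acc k w : Int) :
    ((PySem.Dict.mk (pvShift acc l)).insert (k + acc) w).items =
      pvShift acc (((PySem.Dict.mk l).insert k w).items) := by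
  by_cases hc : (PySem.Dict.mk l).contains k = true
  · rw [PySem.Dict.items_insert_of_contains _ _ (by rw [contains_mk_pvShift]; exact hc),
      PySem.Dict.items_insert_of_contains _ _ hc]
    show (l.map _).map _ = (l.map _).map _
    rw [List.map_map, List.map_map]
    apply List.map_congr_left
    intro p _
    obtain ⟨p1, p2⟩ := p
    show (if ((p1 + acc == k + acc) = true) then (k + acc, w) else (p1 + acc, p2))
        = (fun kv : Int × Int => (kv.1 + acc, kv.2)) (if ((p1 == k) = true) then (k, w) else (p1, p2))
    by_cases h : p1 = k
    · simp [h]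
    · rw [if_neg (by simpa using fun hh => h (by omega)), if_neg (by simpa using h)]
  · have hc' : (PySem.Dict.mk l).contains k = false := by
      cases hcc : (PySem.Dict.mk l).contains k
      · rfl
      · exact absurd hcc hc
    rw [PySem.Dict.items_insert_of_not_contains _ _ (by rw [contains_mk_pvShift]; exact hc'),
      PySem.Dict.items_insert_of_not_contains _ _ hc']
    show _ = pvShift acc (l ++ [(k, w)])
    simp [pvShift]

theorem pvBump_pvShift (S : List (Int × Int)) (l : List (Int × Int)) (acc : Int) :
    (pvBump (PySem.Dict.mk (pvShift acc l)) (pvShift acc S)).items =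
      pvShift acc ((pvBump (PySem.Dict.mk l) S).items) := by
  induction S generalizing l with
  | nil => rfl
  | cons kv T ih =>
      obtain ⟨k, v⟩ := kv
      rw [show pvShift acc ((k, v) :: T) = (k + acc, v) :: pvShift acc T from rfl,
        pvBump_cons, pvBump_cons]
      have hgd : (PySem.Dict.mk (pvShift acc l)).getD (k + acc) 0
          = (PySem.Dict.mk l).getD k 0 := by
        rw [PySem.Dict.getD_eq_get?_getD, PySem.Dict.getD_eq_get?_getD, get?_mk_pvShift]
      rw [hgd]
      have heq : (PySem.Dict.mk (pvShift acc l)).insert (k + acc) ((PySem.Dict.mk l).getD k 0 + v)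
          = PySem.Dict.mk (pvShift acc (((PySem.Dict.mk l).insert k ((PySem.Dict.mk l).getD k 0 + v)).items)) := by
        apply PySem.Dict.ext
        exact insert_mk_pvShift l acc k _
      rw [heq, ih]

theorem pvBump_pvShift_empty (S : List (Int × Int)) (acc : Int) :
    (pvBump PySem.Dict.empty (pvShift acc S)).items =
      pvShift acc ((pvBump PySem.Dict.empty S).items) :=
  pvBump_pvShift S [] acc

theorem pvBump_flatMap {α : Type} (l : List α) (g : α → List (Int × Int))
    (c : PySem.Dict Int Int) :
    l.foldl (fun c x => pvBump c (g x)) c = pvBump c (l.flatMap g) := by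
  induction l generalizing c with
  | nil => rfl
  | cons x t ih => rw [List.foldl_cons, List.flatMap_cons, pvBump_append, ih]

theorem pvShift_flatMap {α : Type} (l : List α) (g : α → List (Int × Int)) (acc : Int) :
    pvShift acc (l.flatMap g) = l.flatMap (fun x => pvShift acc (g x)) := by
  simp [pvShift, List.map_flatMap]

theorem pvShift_pvShift (X : List (Int × Int)) (acc f : Int) :
    pvShift (acc + f) X = pvShift acc (pvShift f X) := by
  simp only [pvShift, List.map_map]
  apply List.map_congr_left
  intro kv _
  simp [Function.comp]
  omega

theorem pvShift_zero (s : List (Int × Int)) : pvShift 0 s = s := by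
  simp [pvShift]

theorem nodup_keys_pvBump (s : List (Int × Int)) (d : PySem.Dict Int Int)
    (h : d.keys.Nodup) : (pvBump d s).keys.Nodup :=
  PySem.Dict.nodup_keys_foldl_insert_key s Prod.fst (fun c kv => c.getD kv.1 0 + kv.2) d h

theorem nodup_keys_pvStep_aux (di : List Int) (r : PySem.Dict Int Int)
    (c : PySem.Dict Int Int) (h : c.keys.Nodup) :
    (di.foldl (fun nx num => pvBump nx (pvShift num r.items)) c).keys.Nodup := by
  induction di generalizing c with
  | nil => exact h
  | cons x t ih => exact ih _ (nodup_keys_pvBump _ _ h)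

theorem nodup_keys_pvConv (d0 : List Int) (rest : List (List Int)) :
    (pvConv d0 rest).keys.Nodup := by
  have base : ∀ (r : PySem.Dict Int Int), r.keys.Nodup →
      (rest.foldl pvStep r).keys.Nodup := by
    induction rest with
    | nil => intro r h; exact h
    | cons di t ih =>
        intro r h
        exact ih _ (nodup_keys_pvStep_aux di r PySem.Dict.empty PySem.Dict.nodup_keys_empty)
  exact base _ (PySem.Dict.nodup_keys_foldl_insert d0
    (fun r num => r.getD num 0 + 1) PySem.Dict.empty PySem.Dict.nodup_keys_empty)

theorem pvBump_empty_of_nodup_aux (l2 l1 : List (Int × Int))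
    (h : ((l1 ++ l2).map Prod.fst).Nodup) :
    pvBump (PySem.Dict.mk l1) l2 = PySem.Dict.mk (l1 ++ l2) := by
  induction l2 generalizing l1 with
  | nil => rw [pvBump_nil, List.append_nil]
  | cons kv t ih =>
      obtain ⟨k, v⟩ := kv
      have hknot : k ∉ l1.map Prod.fst := by
        intro hkm
        rw [List.map_append] at h
        exact (List.nodup_append.mp h).2.2 k hkm k (by simp) rfl
      have hc : (PySem.Dict.mk l1).contains k = false := by
        rw [PySem.Dict.contains_eq_decide_mem_keys, PySem.Dict.keys_mk]
        simpa using hknot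
      rw [pvBump_cons, PySem.Dict.getD_of_not_contains _ _ hc, zero_add]
      have hins : (PySem.Dict.mk l1).insert k v = PySem.Dict.mk (l1 ++ [(k, v)]) := by
        apply PySem.Dict.ext
        rw [PySem.Dict.items_insert_of_not_contains _ _ hc]
      rw [hins, ih (l1 ++ [(k, v)]) (by simpa [List.append_assoc] using h), List.append_assoc]
      rfl

theorem pvBump_empty_items (d : PySem.Dict Int Int) (h : d.keys.Nodup) :
    pvBump PySem.Dict.empty d.items = d := by
  have := pvBump_empty_of_nodup_aux d.items []
    (by simpa [PySem.Dict.keys] using h)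
  simpa using this

theorem pvBase_eq (d0 : List Int) :
    d0.foldl (fun r num => r.insert num (r.getD num 0 + 1)) PySem.Dict.empty
      = pvBump PySem.Dict.empty (d0.map (fun f => (f, (1 : Int)))) := by
  simp [pvBump, List.foldl_map]

-- the key lemma: B's recursive enumeration of the first j+1 selected dice equals
-- bumping the accumulator with A's convolution of those dice, shifted by acc
theorem pvGoB_eq_conv (d0 : List Int) (rest : List (List Int)) (j : Nat) :
    ∀ (acc : Int) (c : PySem.Dict Int Int), j ≤ rest.length →
    pvGoB (d0 :: rest) (j + 1) acc c
      = pvBump c (pvShift acc (pvConv d0 (rest.take j)).items) := by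
  induction j with
  | zero =>
      intro acc c _
      show d0.foldl (fun c face => pvGoB (d0 :: rest) 0 (acc + face) c) c = _
      have h1 : (fun (c : PySem.Dict Int Int) face => pvGoB (d0 :: rest) 0 (acc + face) c)
          = fun c face => c.insert (face + acc) (c.getD (face + acc) 0 + 1) := by
        funext c f
        show c.insert (acc + f) (c.getD (acc + f) 0 + 1) = _
        rw [Int.add_comm]
      rw [h1]
      have h2 : pvConv d0 (rest.take 0)
          = pvBump PySem.Dict.empty (d0.map (fun f => (f, (1 : Int)))) := pvBase_eq d0
      rw [List.take_zero] at h2 ⊢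
      rw [h2, ← pvBump_pvShift_empty, pvBump_norm]
      have h3 : pvShift acc (d0.map (fun f => (f, (1 : Int))))
          = d0.map (fun f => (f + acc, (1 : Int))) := by
        simp [pvShift, List.map_map, Function.comp]
      rw [h3]
      simp [pvBump, List.foldl_map]
  | succ j ih =>
      intro acc c hj
      have hjlt : j < rest.length := hj
      show ((d0 :: rest).getD (j + 1) []).foldl
          (fun c face => pvGoB (d0 :: rest) (j + 1) (acc + face) c) c = _
      have hgetD : (d0 :: rest).getD (j + 1) [] = rest.getD j [] := rfl
      have h1 : (fun (c : PySem.Dict Int Int) face => pvGoB (d0 :: rest) (j + 1) (acc + face) c)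
          = fun c face =>
              pvBump c (pvShift (acc + face) (pvConv d0 (rest.take j)).items) := by
        funext c f
        exact ih (acc + f) c (Nat.le_of_lt hjlt)
      rw [hgetD, h1]
      set D := pvConv d0 (rest.take j) with hD
      have h2 : (fun (c : PySem.Dict Int Int) face => pvBump c (pvShift (acc + face) D.items))
          = fun c face => pvBump c (pvShift acc (pvShift face D.items)) := by
        funext c f
        rw [pvShift_pvShift]
      rw [h2]
      have h3 : (rest.getD j []).foldl
            (fun c face => pvBump c (pvShift acc (pvShift face D.items))) c
          = pvBump c ((rest.getD j []).flatMap (fun face => pvShift acc (pvShift face D.items))) :=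
        pvBump_flatMap _ _ c
      rw [h3, ← pvShift_flatMap]
      have htake : rest.take (j + 1) = rest.take j ++ [rest.getD j []] := by
        rw [List.take_add_one]
        congr 1
        rw [List.getElem?_eq_getElem hjlt]
        simp [List.getD, List.getElem?_eq_getElem hjlt]
      have h4 : pvConv d0 (rest.take (j + 1)) = pvStep D (rest.getD j []) := by
        rw [htake]
        simp [pvConv, List.foldl_append, hD]
      rw [h4]
      have h5 : pvStep D (rest.getD j [])
          = pvBump PySem.Dict.empty
              ((rest.getD j []).flatMap (fun face => pvShift face D.items)) :=
        pvBump_flatMap _ _ _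
      rw [h5, ← pvBump_pvShift_empty, pvBump_norm]

theorem pyGet?_of_inRange {α : Type} (xs : List α) (i : Int) (d : α)
    (h : PySem.Raise.InRange xs.length i) :
    PySem.List.pyGet? xs i = some (PySem.List.pyGetD xs i d) := by
  cases hx : PySem.List.pyGet? xs i with
  | none => exact absurd ((PySem.List.pyGet?_eq_none_iff xs i).mp hx) (by simpa using h)
  | some v => simp [PySem.List.pyGetD, hx]

-- ===== VERDICT (by name: the statement is the Claim_ definition above) =====
theorem sum_statistics_spec : Claim_equal_sum_statistics := by
  intro dice combination _ hpre
  obtain ⟨hne, hrange⟩ := hpre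
  obtain ⟨c0, ctail, rfl⟩ : ∃ c0 ctail, combination = c0 :: ctail := by
    cases combination with
    | nil => exact absurd rfl hne
    | cons a t => exact ⟨a, t, rfl⟩
  unfold Spec_sum_statistics
  set d0 := PySem.List.pyGetD dice c0 [] with hd0
  set rest := ctail.map (fun i => PySem.List.pyGetD dice i []) with hrest
  -- evaluate A
  have hA : sum_statistics dice (c0 :: ctail) = (pvConv d0 rest).items := by
    have hg0 : PySem.List.pyGet? (c0 :: ctail) 0 = some c0 := by simp [pysem]
    have hgc : PySem.List.pyGet? dice c0 = some d0 :=
      pyGet?_of_inRange dice c0 [] (hrange c0 (by simp))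
    simp only [sum_statistics, hg0, hgc, PySem.List.slice_from_one, List.tail_cons]
    have hfold : ∀ (r : PySem.Dict Int Int),
        ctail.foldl
          (fun r i =>
            (PySem.List.pyGetD dice i []).foldl
              (fun nx num =>
                r.items.foldl
                  (fun nx kv => nx.insert (kv.1 + num) (nx.getD (kv.1 + num) 0 + kv.2)) nx)
              PySem.Dict.empty)
          r
        = rest.foldl pvStep r := by
      intro r
      rw [hrest, List.foldl_map]
      have hfn : (fun (r : PySem.Dict Int Int) (i : Int) =>
            (PySem.List.pyGetD dice i []).foldl
              (fun nx num =>
                r.items.foldl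
                  (fun nx kv => nx.insert (kv.1 + num) (nx.getD (kv.1 + num) 0 + kv.2)) nx)
              PySem.Dict.empty)
          = fun r i => pvStep r (PySem.List.pyGetD dice i []) := by
        funext r' i
        simp [pvStep, pvBump, pvShift, List.foldl_map]
      rw [hfn]
    rw [hfold]
    rfl
  -- evaluate B
  have hB : sum_statistics_alt dice (c0 :: ctail) = (pvConv d0 rest).items := by
    unfold sum_statistics_alt
    have hsel : (c0 :: ctail).map (fun i => PySem.List.pyGetD dice i []) = d0 :: rest := rfl
    simp only [hsel]
    have hlen : (d0 :: rest).length = rest.length + 1 := rfl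
    rw [hlen, pvGoB_eq_conv d0 rest rest.length 0 PySem.Dict.empty (Nat.le_refl _),
      List.take_length, pvShift_zero,
      pvBump_empty_items _ (nodup_keys_pvConv d0 rest)]
  rw [hA, hB]

def sum_statistics_raises : Claim_raises_sum_statistics := by
  unfold Claim_raises_sum_statistics
  exact ⟨fun dice combination _ hr hpre => hpre.1 hr, by decide⟩
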